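-- pv_equiv track=rewrite | github.com/AhmedMahrous00/icbc_2026_reproducibility | openai_extraction.py | extract_from_output
-- ===== SOURCE A (Python) =====
-- def extract_from_output(out):
--     coin, exch = None, None
--     for line in out.split("\n"):
--         line = line.strip()
--         if line.startswith("Coin:"):
--             coin = line.split("Coin:")[1].strip() or None
--         if line.startswith("Exchange:"):
--             exch = line.split("Exchange:")[1].strip() or None
--     return {"coin": coin, "exchange": exch}
-- ===== SOURCE B (Python) =====
-- def extract_from_output(out):
--     lines = [l.strip() for l in out.split("\n")]
--
--     def last_value(tag):
--         for line in reversed(lines):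
--             if line.startswith(tag):
--                 return line.split(tag)[1].strip() or None
--         return None
--
--     return {"coin": last_value("Coin:"), "exchange": last_value("Exchange:")}
-- ===== Notes on version B (the rewrite author's own statement) =====
-- stated objective: simpler
-- what changed: Replaces A's single forward pass that overwrites a mutable (coin, exch) state on every matching line with two independent reverse searches that each return the value of the last line starting with the tag.
import Mathlib
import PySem

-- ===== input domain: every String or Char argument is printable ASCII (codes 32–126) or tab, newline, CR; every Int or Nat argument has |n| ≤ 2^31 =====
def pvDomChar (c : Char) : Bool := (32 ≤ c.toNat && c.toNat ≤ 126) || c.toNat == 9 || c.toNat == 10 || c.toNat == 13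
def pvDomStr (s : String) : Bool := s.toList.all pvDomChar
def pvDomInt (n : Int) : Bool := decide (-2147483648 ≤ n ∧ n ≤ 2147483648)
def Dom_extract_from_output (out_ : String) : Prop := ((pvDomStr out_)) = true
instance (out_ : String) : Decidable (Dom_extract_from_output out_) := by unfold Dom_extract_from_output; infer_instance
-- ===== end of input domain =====

-- B replaces A's single stateful overwrite loop by two independent reverse searches
-- for the last matching line (objective: simpler decomposition; same asymptotic cost).


-- ===== PORT A =====
-- `line.split(tag)[1].strip() or None`: the [1] index is only evaluated under
-- `line.startswith(tag)`, where split produces ≥ 2 parts, so the pyGetD default "" is unreachable.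
def pvGrabA (line tag : String) : Option String :=
  let v := PySem.Str.strip (PySem.List.pyGetD ((PySem.Str.split? line tag).getD []) 1 "")
  if v = "" then none else some v

-- the body of A's for-loop, acting on the state (coin, exch)
def pvStepA (st : Option String × Option String) (line0 : String) :
    Option String × Option String :=
  let line := PySem.Str.strip line0
  let st1 := if PySem.Str.startswith line "Coin:" then (pvGrabA line "Coin:", st.2) else st
  if PySem.Str.startswith line "Exchange:" then (st1.1, pvGrabA line "Exchange:") else st1

def extract_from_output (out_ : String) : List (String × Option String) :=
  let r := ((PySem.Str.split? out_ "\n").getD []).foldl pvStepA (none, none)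
  [("coin", r.1), ("exchange", r.2)]

-- ===== PORT B =====
-- value of the last (stripped) line starting with `tag`, found by scanning the lines in reverse
def pvLastValue (lines : List String) (tag : String) : Option String :=
  match lines.reverse.find? (fun line => PySem.Str.startswith line tag) with
  | none => none
  | some line =>
      let v := PySem.Str.strip (PySem.List.pyGetD ((PySem.Str.split? line tag).getD []) 1 "")
      if v = "" then none else some v

def extract_from_output_alt (out_ : String) : List (String × Option String) :=
  let lines := ((PySem.Str.split? out_ "\n").getD []).map PySem.Str.strip
  [("coin", pvLastValue lines "Coin:"), ("exchange", pvLastValue lines "Exchange:")]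

-- ===== PRECONDITION & SPEC =====
def Spec_extract_from_output (out_ : String) (out : List (String × Option String)) : Prop := out = extract_from_output_alt out_
instance (out_ : String) (out : List (String × Option String)) : Decidable (Spec_extract_from_output out_ out) := by unfold Spec_extract_from_output; infer_instance

-- ===== CLAIM (what is proved, stated in full; the proofs are below) =====
def Claim_equal_extract_from_output : Prop := ∀ (out_ : String), Dom_extract_from_output out_ → Spec_extract_from_output out_ (extract_from_output out_)

-- ===== LEMMAS AND PROOFS =====

-- one component of A's loop state: overwrite when the stripped line matches the tag
def pvUpd (tag : String) (acc : Option String) (line : String) : Option String :=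
  if PySem.Str.startswith line tag then pvGrabA line tag else acc

lemma pvStepA_eq (st : Option String × Option String) (line0 : String) :
    pvStepA st line0 =
      (pvUpd "Coin:" st.1 (PySem.Str.strip line0),
       pvUpd "Exchange:" st.2 (PySem.Str.strip line0)) := by
  show (let line := PySem.Str.strip line0
    let st1 := if PySem.Str.startswith line "Coin:" then (pvGrabA line "Coin:", st.2) else st
    if PySem.Str.startswith line "Exchange:" then (st1.1, pvGrabA line "Exchange:") else st1) = _
  generalize PySem.Str.strip line0 = line
  cases hb1 : PySem.Str.startswith line "Coin:" <;>
    cases hb2 : PySem.Str.startswith line "Exchange:" <;>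
      simp only [pvUpd, hb1, hb2, reduceIte] <;> rfl

-- a foldl over a pair whose components are updated independently splits into two foldls
lemma pvFoldl_pair {σ α β : Type} (f : α → σ → α) (g : β → σ → β) (l : List σ) (a : α) (b : β) :
    l.foldl (fun p s => (f p.1 s, g p.2 s)) (a, b) = (l.foldl f a, l.foldl g b) := by
  induction l generalizing a b with
  | nil => rfl
  | cons x xs ih => simp [List.foldl_cons, ih]

-- an overwrite-on-match foldl computes the value at the LAST matching element
lemma pvFoldl_upd_eq_find {α : Type} (p : α → Bool) (g : α → Option String)
    (l : List α) (a : Option String) :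
    l.foldl (fun acc s => if p s then g s else acc) a =
      (match l.reverse.find? p with
       | some s => g s
       | none => a) := by
  induction l generalizing a with
  | nil => rfl
  | cons x xs ih =>
      simp only [List.foldl_cons, List.reverse_cons, List.find?_append, ih]
      cases h : xs.reverse.find? p <;> by_cases hp : p x <;> simp [hp, List.find?]

lemma pvComponent (lines0 : List String) (tag : String) :
    lines0.foldl (fun acc l0 => pvUpd tag acc (PySem.Str.strip l0)) none =
      pvLastValue (lines0.map PySem.Str.strip) tag := by
  rw [← List.foldl_map (f := PySem.Str.strip)]
  rw [show (pvUpd tag) = (fun acc s => if PySem.Str.startswith s tag then pvGrabA s tag else acc)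
        from funext fun _ => funext fun _ => rfl]
  rw [pvFoldl_upd_eq_find (fun line => PySem.Str.startswith line tag) (fun line => pvGrabA line tag)]
  unfold pvLastValue
  cases (List.find? (fun line => PySem.Str.startswith line tag) (lines0.map PySem.Str.strip).reverse) <;> rfl

-- ===== VERDICT (by name: the statement is the Claim_ definition above) =====
theorem extract_from_output_spec : Claim_equal_extract_from_output := by
  intro out_ _
  have hstep : pvStepA = fun st l0 =>
      (pvUpd "Coin:" st.1 (PySem.Str.strip l0), pvUpd "Exchange:" st.2 (PySem.Str.strip l0)) :=
    funext fun st => funext fun l0 => pvStepA_eq st l0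
  simp only [Spec_extract_from_output, extract_from_output, extract_from_output_alt, hstep]
  rw [pvFoldl_pair (fun a l0 => pvUpd "Coin:" a (PySem.Str.strip l0))
        (fun b l0 => pvUpd "Exchange:" b (PySem.Str.strip l0)),
      pvComponent, pvComponent]
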